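-- pv_equiv track=rewrite | github.com/jemurrayPhD/OrbSim | src/orbsim/chem/aufbau.py | fill_subshells
-- ===== SOURCE A (Python) =====
-- SUBSHELL_ORDER: tuple[tuple[int, int, int], ...] = (
--     (1, 0, 2),
--     (2, 0, 2),
--     (2, 1, 6),
--     (3, 0, 2),
--     (3, 1, 6),
--     (4, 0, 2),
--     (3, 2, 10),
--     (4, 1, 6),
--     (5, 0, 2),
--     (4, 2, 10),
--     (5, 1, 6),
--     (6, 0, 2),
--     (4, 3, 14),
--     (5, 2, 10),
--     (6, 1, 6),
--     (7, 0, 2),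
--     (5, 3, 14),
--     (6, 2, 10),
--     (7, 1, 6),
-- )
--
-- AUFBAU_EXCEPTION_ADJUSTMENTS: dict[int, dict[tuple[int, int], int]] = {
--     24: {(4, 0): -1, (3, 2): 1},  # Cr
--     29: {(4, 0): -1, (3, 2): 1},  # Cu
--     42: {(5, 0): -1, (4, 2): 1},  # Mo
--     46: {(5, 0): -2, (4, 2): 2},  # Pd
--     47: {(5, 0): -1, (4, 2): 1},  # Ag
--     79: {(6, 0): -1, (5, 2): 1},  # Au
-- }
--
-- def fill_subshells(electron_count: int, apply_exceptions: bool = True) -> dict[tuple[int, int], int]: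
--     subshells: dict[tuple[int, int], int] = {}
--     remaining = max(0, int(electron_count))
--     for n, l, cap in SUBSHELL_ORDER:
--         if remaining <= 0:
--             break
--         fill = min(cap, remaining)
--         subshells[(n, l)] = fill
--         remaining -= fill
--     if apply_exceptions:
--         adjustments = AUFBAU_EXCEPTION_ADJUSTMENTS.get(int(electron_count))
--         if adjustments:
--             for (n, l), delta in adjustments.items():
--                 subshells[(n, l)] = max(0, subshells.get((n, l), 0) + delta)
--     return subshells
-- ===== SOURCE B (Python) =====
-- SUBSHELL_ORDER = (
--     (1, 0, 2), (2, 0, 2), (2, 1, 6), (3, 0, 2), (3, 1, 6), (4, 0, 2),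
--     (3, 2, 10), (4, 1, 6), (5, 0, 2), (4, 2, 10), (5, 1, 6), (6, 0, 2),
--     (4, 3, 14), (5, 2, 10), (6, 1, 6), (7, 0, 2), (5, 3, 14), (6, 2, 10),
--     (7, 1, 6),
-- )
--
-- AUFBAU_EXCEPTION_ADJUSTMENTS = {
--     24: {(4, 0): -1, (3, 2): 1},  # Cr
--     29: {(4, 0): -1, (3, 2): 1},  # Cu
--     42: {(5, 0): -1, (4, 2): 1},  # Mo
--     46: {(5, 0): -2, (4, 2): 2},  # Pd
--     47: {(5, 0): -1, (4, 2): 1},  # Ag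
--     79: {(6, 0): -1, (5, 2): 1},  # Au
-- }
--
--
-- def fill_subshells(electron_count: int, apply_exceptions: bool = True) -> dict:
--     e = max(0, int(electron_count))
--     # precompute the number of electrons consumed before each subshell
--     starts = []
--     total = 0
--     for _, _, cap in SUBSHELL_ORDER:
--         starts.append(total)
--         total += cap
--     subshells = {
--         (n, l): min(cap, e - start)
--         for (n, l, cap), start in zip(SUBSHELL_ORDER, starts)
--         if min(cap, e - start) > 0
--     }
--     if apply_exceptions:
--         adjustments = AUFBAU_EXCEPTION_ADJUSTMENTS.get(int(electron_count))
--         if adjustments: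
--             for (n, l), delta in adjustments.items():
--                 subshells[(n, l)] = max(0, subshells.get((n, l), 0) + delta)
--     return subshells
-- ===== Notes on version B (the rewrite author's own statement) =====
-- stated objective: alternative
-- what changed: Replaces the subtractive `remaining` accumulator with early break by a precomputed prefix-sum of capacities and a direct dict comprehension fill = min(cap, e - start), skipping non-positive fills.
import Mathlib
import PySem

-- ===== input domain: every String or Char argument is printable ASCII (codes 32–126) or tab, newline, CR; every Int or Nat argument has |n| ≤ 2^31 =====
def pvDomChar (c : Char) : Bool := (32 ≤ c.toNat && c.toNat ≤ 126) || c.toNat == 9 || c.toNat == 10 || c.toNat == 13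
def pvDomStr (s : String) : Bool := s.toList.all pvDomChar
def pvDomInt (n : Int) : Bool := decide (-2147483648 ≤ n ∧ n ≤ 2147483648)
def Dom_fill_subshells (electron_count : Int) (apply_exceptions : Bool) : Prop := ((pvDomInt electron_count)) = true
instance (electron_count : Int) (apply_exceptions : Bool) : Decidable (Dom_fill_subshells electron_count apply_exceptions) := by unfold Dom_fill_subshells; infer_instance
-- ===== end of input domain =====

-- B replaces the subtractive `remaining` accumulator and early break by a precomputed
-- prefix-sum of capacities and a direct dict comprehension (objective: alternative decomposition).

-- ===== PORT A =====
def subshellOrder : List (Int × Int × Int) :=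
  [(1,0,2),(2,0,2),(2,1,6),(3,0,2),(3,1,6),(4,0,2),(3,2,10),(4,1,6),(5,0,2),(4,2,10),
   (5,1,6),(6,0,2),(4,3,14),(5,2,10),(6,1,6),(7,0,2),(5,3,14),(6,2,10),(7,1,6)]

def aufbauAdjustments : PySem.Dict Int (PySem.Dict (Int × Int) Int) :=
  PySem.Dict.mk
    [(24, PySem.Dict.mk [((4,0),-1),((3,2),1)]),
     (29, PySem.Dict.mk [((4,0),-1),((3,2),1)]),
     (42, PySem.Dict.mk [((5,0),-1),((4,2),1)]),
     (46, PySem.Dict.mk [((5,0),-2),((4,2),2)]),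
     (47, PySem.Dict.mk [((5,0),-1),((4,2),1)]),
     (79, PySem.Dict.mk [((6,0),-1),((5,2),1)])]

-- the `for … break` loop of A, step for step
def fillLoopA : Int → PySem.Dict (Int × Int) Int → List (Int × Int × Int) → PySem.Dict (Int × Int) Int
  | _, subshells, [] => subshells
  | remaining, subshells, (n, l, cap) :: rest =>
    if remaining ≤ 0 then subshells
    else
      let fill := min cap remaining
      fillLoopA (remaining - fill) (subshells.insert (n, l) fill) rest

-- A's exception block (`if adjustments:` is the non-empty-dict truth test)
def applyAdjustmentsA (electron_count : Int) (subshells : PySem.Dict (Int × Int) Int) :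
    PySem.Dict (Int × Int) Int :=
  match aufbauAdjustments.get? electron_count with
  | none => subshells
  | some adjustments =>
    if adjustments.items = [] then subshells
    else adjustments.items.foldl
      (fun s kv => s.insert kv.1 (max 0 (s.getD kv.1 0 + kv.2))) subshells

def fill_subshells (electron_count : Int) (apply_exceptions : Bool) : List (Int × Int × Int) :=
  let subshells := fillLoopA (max 0 electron_count) (PySem.Dict.mk []) subshellOrder
  let subshells := if apply_exceptions then applyAdjustmentsA electron_count subshells else subshells
  subshells.items.map (fun kv => (kv.1.1, kv.1.2, kv.2))

-- ===== PORT B =====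
-- the `starts` loop of Source B (append to list, running total)
def capStartsB : List (Int × Int × Int) → Int → List Int
  | [], _ => []
  | (_, _, cap) :: rest, total => total :: capStartsB rest (total + cap)

-- B's exception block (same Python text as in A)
def applyAdjustmentsB (electron_count : Int) (subshells : PySem.Dict (Int × Int) Int) :
    PySem.Dict (Int × Int) Int :=
  match aufbauAdjustments.get? electron_count with
  | none => subshells
  | some adjustments =>
    if adjustments.items = [] then subshells
    else adjustments.items.foldl
      (fun s kv => s.insert kv.1 (max 0 (s.getD kv.1 0 + kv.2))) subshells

def fill_subshells_alt (electron_count : Int) (apply_exceptions : Bool) : List (Int × Int × Int) :=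
  let e := max 0 electron_count
  let starts := capStartsB subshellOrder 0
  -- the dict comprehension over zip(SUBSHELL_ORDER, starts); keys are distinct, so the
  -- built dict's item list is exactly this filterMap
  let subshells : PySem.Dict (Int × Int) Int :=
    PySem.Dict.mk ((subshellOrder.zip starts).filterMap (fun ts =>
      if min ts.1.2.2 (e - ts.2) > 0 then some ((ts.1.1, ts.1.2.1), min ts.1.2.2 (e - ts.2))
      else none))
  let subshells := if apply_exceptions then applyAdjustmentsB electron_count subshells else subshells
  subshells.items.map (fun kv => (kv.1.1, kv.1.2, kv.2))

-- ===== PRECONDITION & SPEC =====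
def Spec_fill_subshells (electron_count : Int) (apply_exceptions : Bool) (out : List (Int × Int × Int)) : Prop := out = fill_subshells_alt electron_count apply_exceptions
instance (electron_count : Int) (apply_exceptions : Bool) (out : List (Int × Int × Int)) : Decidable (Spec_fill_subshells electron_count apply_exceptions out) := by unfold Spec_fill_subshells; infer_instance

-- ===== CLAIM (what is proved, stated in full; the proofs are below) =====
def Claim_equal_fill_subshells : Prop := ∀ (electron_count : Int) (apply_exceptions : Bool), Dom_fill_subshells electron_count apply_exceptions → Spec_fill_subshells electron_count apply_exceptions (fill_subshells electron_count apply_exceptions)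

-- ===== LEMMAS AND PROOFS =====

-- B's comprehension core as a function of m = max 0 e (exactly the term in fill_subshells_alt)
def coreB (m : Int) : PySem.Dict (Int × Int) Int :=
  PySem.Dict.mk ((subshellOrder.zip (capStartsB subshellOrder 0)).filterMap (fun ts =>
    if min ts.1.2.2 (m - ts.2) > 0 then some ((ts.1.1, ts.1.2.1), min ts.1.2.2 (m - ts.2))
    else none))

lemma caps_sum_nonneg (L : List (Int × Int × Int)) (hpos : ∀ t ∈ L, 0 < t.2.2) :
    0 ≤ (L.map (fun t => t.2.2)).sum := by
  apply List.sum_nonneg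
  intro x hx
  obtain ⟨t, ht, rfl⟩ := List.mem_map.mp hx
  exact le_of_lt (hpos t ht)

-- when enough electrons remain, A's loop fills every subshell to capacity
lemma fillLoopA_ge (L : List (Int × Int × Int)) : ∀ (r : Int) (acc : PySem.Dict (Int × Int) Int),
    (∀ t ∈ L, 0 < t.2.2) → (L.map (fun t => t.2.2)).sum ≤ r →
    (∀ t ∈ L, acc.contains (t.1, t.2.1) = false) →
    (L.map (fun t => (t.1, t.2.1))).Nodup →
    fillLoopA r acc L = PySem.Dict.mk (acc.items ++ L.map (fun t => ((t.1, t.2.1), t.2.2))) := by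
  induction L with
  | nil => intro r acc _ _ _ _; cases acc; simp [fillLoopA]
  | cons t rest ih =>
    obtain ⟨n, l, c⟩ := t
    intro r acc hpos hsum hfresh hnodup
    have hc : (0 : Int) < c := hpos (n, l, c) (List.mem_cons_self)
    have hrest : 0 ≤ (rest.map (fun t => t.2.2)).sum :=
      caps_sum_nonneg rest (fun t ht => hpos t (List.mem_cons_of_mem _ ht))
    simp only [List.map_cons, List.sum_cons] at hsum
    have hcr : c ≤ r := by omega
    rw [fillLoopA, if_neg (by omega)]
    simp only [min_eq_left hcr]
    rw [ih (r - c) (acc.insert (n, l) c)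
      (fun t ht => hpos t (List.mem_cons_of_mem _ ht))
      (by omega)
      (fun t ht => by
        rw [PySem.Dict.contains_insert]
        simp only [List.map_cons, List.nodup_cons, List.mem_map] at hnodup
        have hne : (t.1, t.2.1) ≠ (n, l) := fun he => hnodup.1 ⟨t, ht, he⟩
        simp [hne, hfresh t (List.mem_cons_of_mem _ ht)])
      (by simp only [List.map_cons, List.nodup_cons] at hnodup; exact hnodup.2)]
    rw [PySem.Dict.items_insert_of_not_contains acc c
      (by simpa using hfresh (n, l, c) (List.mem_cons_self))]
    simp

-- when enough electrons remain, B's comprehension also takes every subshell at capacity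
lemma filterMapB_ge (L : List (Int × Int × Int)) : ∀ (m s0 : Int),
    (∀ t ∈ L, 0 < t.2.2) → s0 + (L.map (fun t => t.2.2)).sum ≤ m →
    (L.zip (capStartsB L s0)).filterMap (fun ts =>
      if min ts.1.2.2 (m - ts.2) > 0 then some ((ts.1.1, ts.1.2.1), min ts.1.2.2 (m - ts.2))
      else none) = L.map (fun t => ((t.1, t.2.1), t.2.2)) := by
  induction L with
  | nil => intro m s0 _ _; simp [capStartsB]
  | cons t rest ih =>
    obtain ⟨n, l, c⟩ := t
    intro m s0 hpos hsum
    have hc : (0 : Int) < c := hpos (n, l, c) (List.mem_cons_self)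
    have hrest : 0 ≤ (rest.map (fun t => t.2.2)).sum :=
      caps_sum_nonneg rest (fun t ht => hpos t (List.mem_cons_of_mem _ ht))
    simp only [List.map_cons, List.sum_cons] at hsum
    rw [capStartsB, List.zip_cons_cons, List.filterMap_cons]
    simp only
    rw [if_pos (by omega)]
    simp only [min_eq_left (by omega : c ≤ m - s0)]
    rw [ih m (s0 + c) (fun t ht => hpos t (List.mem_cons_of_mem _ ht)) (by omega)]
    simp

set_option maxRecDepth 40000 in
set_option maxHeartbeats 4000000 in
lemma core_eq (m : Int) (h : 0 ≤ m) :
    fillLoopA m (PySem.Dict.mk []) subshellOrder = coreB m := by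
  by_cases hm : m ≤ 118
  · lift m to Nat using h with k
    have hk : k < 119 := by omega
    have H : ∀ k ∈ List.range 119,
        fillLoopA (k : Int) (PySem.Dict.mk []) subshellOrder = coreB (k : Int) := by decide
    exact H k (List.mem_range.mpr hk)
  · rw [fillLoopA_ge subshellOrder m (PySem.Dict.mk [])
        (by decide) (by norm_num [subshellOrder]; omega) (by decide) (by decide)]
    unfold coreB
    rw [filterMapB_ge subshellOrder m 0 (by decide) (by norm_num [subshellOrder]; omega)]
    simp

-- ===== VERDICT (by name: the statement is the Claim_ definition above) =====
theorem fill_subshells_spec : Claim_equal_fill_subshells := by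
  intro e b _
  unfold Spec_fill_subshells fill_subshells fill_subshells_alt
  rw [core_eq (max 0 e) (le_max_left 0 e)]
  rfl
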